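-- pv_equiv track=rewrite | github.com/gandastik/365Challenge | 365Challenge/isIntAscending.py | isIntAscending
-- ===== SOURCE A (Python) =====
-- def isIntAscending(n: int) -> bool:
--     temp = n
--     lst = []
--     #extract the last digit of the number and append it in the list
--     while(temp > 0):
--         r = temp % 10
--         lst.append(r)
--         temp = temp // 10
--     #check if lst[0] >= to every other elements in the list (contradiction to the idea of the problem)
--     for i in range(1,len(lst)):
--         if(lst[0] < lst[i]):
--             return False
--     return True
-- ===== SOURCE B (Python) =====
-- def isIntAscending(n: int) -> bool:
--     last = n % 10
--     n //= 10
--     while n > 0: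
--         if n % 10 > last:
--             return False
--         n //= 10
--     return True
-- ===== Notes on version B (the rewrite author's own statement) =====
-- stated objective: simpler
-- what changed: B fuses A's build-a-digit-list-then-scan into a single division loop that compares each remaining digit against the fixed last digit, with no list at all and an early exit on the first offending digit.
import Mathlib
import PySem

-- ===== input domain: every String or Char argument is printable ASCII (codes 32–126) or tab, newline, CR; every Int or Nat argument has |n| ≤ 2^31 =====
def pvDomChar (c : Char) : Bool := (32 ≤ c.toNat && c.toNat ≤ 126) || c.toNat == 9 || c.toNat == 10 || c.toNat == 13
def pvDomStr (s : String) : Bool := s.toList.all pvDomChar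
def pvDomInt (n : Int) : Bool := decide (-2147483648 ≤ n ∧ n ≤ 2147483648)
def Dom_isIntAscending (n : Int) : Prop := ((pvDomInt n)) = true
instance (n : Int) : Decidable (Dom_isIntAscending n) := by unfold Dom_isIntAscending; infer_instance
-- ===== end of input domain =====

-- B replaces A's build-a-digit-list-then-scan with a single division loop comparing each
-- remaining digit against the fixed last digit (no list, early exit): simpler.

-- ===== PORT A =====
-- the while loop of A: extract digits least-significant first into a list
def pvDigits (temp : Int) : List Int :=
  if temp > 0 then
    PySem.Int.mod temp 10 :: pvDigits (PySem.Int.floordiv temp 10)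
  else []
  termination_by temp.toNat
  decreasing_by
    have := PySem.Int.floordiv_eq_ediv_of_pos (a := temp) (b := 10) (by omega)
    simp only [this]
    omega

-- the for loop of A over range(1, len(lst)): compare lst[0] with each later element
def pvScan (d0 : Int) : List Int → Bool
  | [] => true
  | d :: ds => if d0 < d then false else pvScan d0 ds

def isIntAscending (n : Int) : Bool :=
  match pvDigits n with
  | [] => true
  | d0 :: rest => pvScan d0 rest

-- ===== PORT B =====
-- the while loop of B: keep dividing, fail on the first digit exceeding `last`
def pvLoopB (last : Int) (n : Int) : Bool :=
  if n > 0 then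
    if PySem.Int.mod n 10 > last then false
    else pvLoopB last (PySem.Int.floordiv n 10)
  else true
  termination_by n.toNat
  decreasing_by
    have := PySem.Int.floordiv_eq_ediv_of_pos (a := n) (b := 10) (by omega)
    simp only [this]
    omega

def isIntAscending_alt (n : Int) : Bool :=
  pvLoopB (PySem.Int.mod n 10) (PySem.Int.floordiv n 10)

-- ===== PRECONDITION & SPEC =====
def Spec_isIntAscending (n : Int) (out : Bool) : Prop := out = isIntAscending_alt n
instance (n : Int) (out : Bool) : Decidable (Spec_isIntAscending n out) := by unfold Spec_isIntAscending; infer_instance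

-- ===== CLAIM (what is proved, stated in full; the proofs are below) =====
def Claim_equal_isIntAscending : Prop := ∀ (n : Int), Dom_isIntAscending n → Spec_isIntAscending n (isIntAscending n)

-- ===== LEMMAS AND PROOFS =====
theorem pvScan_digits_eq_loopB (m : Int) (last : Int) :
    pvScan last (pvDigits m) = pvLoopB last m := by
  by_cases h : m > 0
  · rw [pvDigits, if_pos h, pvLoopB, if_pos h, pvScan]
    by_cases hc : last < PySem.Int.mod m 10
    · rw [if_pos hc, if_pos (show PySem.Int.mod m 10 > last from hc)]
    · rw [if_neg hc, if_neg (show ¬ PySem.Int.mod m 10 > last from hc)]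
      have hlt : (PySem.Int.floordiv m 10).toNat < m.toNat := by
        have := PySem.Int.floordiv_eq_ediv_of_pos (a := m) (b := 10) (by omega)
        simp only [this]; omega
      exact pvScan_digits_eq_loopB (PySem.Int.floordiv m 10) last
  · rw [pvDigits, if_neg h, pvLoopB, if_neg h, pvScan]
  termination_by m.toNat
  decreasing_by
    exact hlt

theorem pvDigits_nonpos (m : Int) (h : ¬ m > 0) : pvDigits m = [] := by
  rw [pvDigits]; simp [h]

theorem isIntAscending_eq (n : Int) : isIntAscending n = isIntAscending_alt n := by
  by_cases h : n > 0
  · unfold isIntAscending isIntAscending_alt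
    rw [pvDigits]
    simp only [h, if_pos]
    exact pvScan_digits_eq_loopB (PySem.Int.floordiv n 10) (PySem.Int.mod n 10)
  · unfold isIntAscending isIntAscending_alt
    rw [pvDigits_nonpos n h]
    have hfd : PySem.Int.floordiv n 10 ≤ 0 := by
      have := PySem.Int.floordiv_eq_ediv_of_pos (a := n) (b := 10) (by omega)
      rw [this]; omega
    rw [pvLoopB, if_neg (show ¬ (PySem.Int.floordiv n 10 > 0) by omega)]

-- ===== VERDICT (by name: the statement is the Claim_ definition above) =====
theorem isIntAscending_spec : Claim_equal_isIntAscending := by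
  intro n _
  unfold Spec_isIntAscending
  exact isIntAscending_eq n
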